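-- pv_equiv track=rewrite | github.com/vahid2510/PoDESL | podesl/parser.py | _split_assignment
-- ===== SOURCE A (Python) =====
-- from typing import Any, Dict, List, Optional
--
-- def _split_assignment(text: str) -> tuple[Optional[str], str]:
--     name = []
--     idx = 0
--     while idx < len(text) and not text[idx].isspace() and text[idx] != "=":
--         name.append(text[idx])
--         idx += 1
--     if not name:
--         return None, text
--     remaining = text[idx:].lstrip()
--     if not remaining.startswith("="):
--         return None, text
--     expr = remaining[1:].strip()
--     return "".join(name), expr
-- ===== SOURCE B (Python) =====
-- from typing import Optional
--
-- def _split_assignment(text: str) -> tuple[Optional[str], str]: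
--     head, sep, tail = text.partition("=")
--     if not sep:
--         return None, text
--     if not head or head[0].isspace():
--         return None, text
--     tokens = head.split()
--     if len(tokens) != 1:
--         return None, text
--     return tokens[0], tail.strip()
-- ===== Notes on version B (the rewrite author's own statement) =====
-- stated objective: idiomatic
-- what changed: B replaces A's explicit character-by-character name scan plus lstrip/startswith post-check with a single partition at the first equals sign followed by validation of the left-hand side (non-empty, no leading whitespace, exactly one whitespace-separated token).
import Mathlib
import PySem

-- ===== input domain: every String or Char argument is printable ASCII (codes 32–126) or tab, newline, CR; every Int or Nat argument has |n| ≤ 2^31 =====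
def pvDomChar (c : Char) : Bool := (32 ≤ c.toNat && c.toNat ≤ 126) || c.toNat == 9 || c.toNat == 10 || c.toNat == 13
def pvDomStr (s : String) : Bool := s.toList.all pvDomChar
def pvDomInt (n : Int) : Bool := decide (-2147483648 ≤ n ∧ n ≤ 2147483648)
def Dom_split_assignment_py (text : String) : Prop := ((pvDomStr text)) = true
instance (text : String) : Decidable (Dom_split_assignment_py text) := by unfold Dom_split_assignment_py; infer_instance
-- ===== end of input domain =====

-- B replaces A's character-by-character name scan with a partition at the first '=' followed by
-- validation of the left-hand side (objective: idiomatic decomposition).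

-- ===== PORT A =====
-- the while loop: collect chars while not space and not '='; returns (name, text[idx:])
def pvNameLoop : List Char → List Char × List Char
  | [] => ([], [])
  | c :: rest =>
    if !PySem.Chars.isspace c && c != '=' then
      let nr := pvNameLoop rest
      (c :: nr.1, nr.2)
    else ([], c :: rest)

def split_assignment_py (text : String) : Option String × String :=
  let nr := pvNameLoop text.toList
  if nr.1.isEmpty then (none, text)
  else
    let remaining := PySem.Chars.lstrip nr.2
    if PySem.Chars.startswith remaining ['='] then
      -- "".join(name) is String.ofList; remaining[1:] is slice from 1
      (some (String.ofList nr.1),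
       String.ofList (PySem.Chars.strip (PySem.Chars.slice remaining (some 1) none)))
    else (none, text)

-- ===== PORT B =====
-- text.partition("="): some (head, tail) when '=' occurs, none when it does not (sep empty)
def pvPartitionEq : List Char → Option (List Char × List Char)
  | [] => none
  | c :: rest =>
    if c = '=' then some ([], rest)
    else match pvPartitionEq rest with
      | none => none
      | some (h, t) => some (c :: h, t)

def split_assignment_py_alt (text : String) : Option String × String :=
  match pvPartitionEq text.toList with
  | none => (none, text)                                   -- if not sep
  | some ([], _) => (none, text)                           -- if not head
  | some (c :: hrest, tail) =>
    if PySem.Chars.isspace c then (none, text)             -- head[0].isspace()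
    else
      let tokens := PySem.Chars.split₀ (c :: hrest)        -- head.split()
      if tokens.length ≠ 1 then (none, text)
      else (some (String.ofList (tokens.headD [])), String.ofList (PySem.Chars.strip tail))

-- ===== PRECONDITION & SPEC =====
def Spec_split_assignment_py (text : String) (out : Option String × String) : Prop := out = split_assignment_py_alt text
instance (text : String) (out : Option String × String) : Decidable (Spec_split_assignment_py text out) := by unfold Spec_split_assignment_py; infer_instance

-- ===== CLAIM (what is proved, stated in full; the proofs are below) =====
def Claim_equal_split_assignment_py : Prop := ∀ (text : String), Dom_split_assignment_py text → Spec_split_assignment_py text (split_assignment_py text)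

-- ===== LEMMAS AND PROOFS =====

-- the name-scan predicate
def pvPb (c : Char) : Bool := !PySem.Chars.isspace c && c != '='

theorem pvNameLoop_eq (cs : List Char) :
    pvNameLoop cs = (cs.takeWhile pvPb, cs.dropWhile pvPb) := by
  induction cs with
  | nil => rfl
  | cons c rest ih =>
    by_cases h : (!PySem.Chars.isspace c && c != '=') = true
    · simp [pvNameLoop, h, pvPb, ih]
    · simp [pvNameLoop, h, show pvPb c = false from by simpa [pvPb] using h]

theorem pvPartitionEq_of_not_mem (cs : List Char) (h : '=' ∉ cs) :
    pvPartitionEq cs = none := by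
  induction cs with
  | nil => rfl
  | cons c rest ih =>
    simp only [List.mem_cons, not_or] at h
    simp [pvPartitionEq, Ne.symm h.1, ih h.2]

theorem pvPartitionEq_append (h t : List Char) (hh : '=' ∉ h) :
    pvPartitionEq (h ++ '=' :: t) = some (h, t) := by
  induction h with
  | nil => simp [pvPartitionEq]
  | cons c rest ih =>
    simp only [List.mem_cons, not_or] at hh
    simp [pvPartitionEq, Ne.symm hh.1, ih hh.2]

theorem pvFirstEq_split (l : List Char) (h : '=' ∈ l) :
    ∃ z1 z2, l = z1 ++ '=' :: z2 ∧ '=' ∉ z1 := by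
  induction l with
  | nil => cases h
  | cons c rest ih =>
    by_cases hc : c = '='
    · exact ⟨[], rest, by simp [hc], by simp⟩
    · obtain ⟨z1, z2, hz, hn⟩ := ih (by simpa [Ne.symm hc] using h)
      exact ⟨c :: z1, z2, by simp [hz], by simp [Ne.symm hc, hn]⟩

-- split₀.go facts
theorem pvGo_prefix (n : List Char) (hn : ∀ c ∈ n, PySem.Chars.isspace c = false)
    (s cur : List Char) (acc : List (List Char)) :
    PySem.Chars.split₀.go (n ++ s) cur acc = PySem.Chars.split₀.go s (n.reverse ++ cur) acc := by
  induction n generalizing cur with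
  | nil => simp
  | cons c n' ih =>
    simp only [List.mem_cons] at hn
    simp [PySem.Chars.split₀.go, hn c (Or.inl rfl), ih (fun d hd => hn d (Or.inr hd))]

theorem pvGo_spaces (w : List Char) (hw : ∀ c ∈ w, PySem.Chars.isspace c = true)
    (cur : List Char) (acc : List (List Char)) :
    PySem.Chars.split₀.go w cur acc
      = if cur.isEmpty then acc.reverse else (cur.reverse :: acc).reverse := by
  induction w generalizing cur acc with
  | nil => simp [PySem.Chars.split₀.go]
  | cons c w' ih =>
    simp only [List.mem_cons] at hw
    by_cases hc : cur.isEmpty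
    · simp [PySem.Chars.split₀.go, hw c (Or.inl rfl), hc, ih (fun d hd => hw d (Or.inr hd))]
    · simp [PySem.Chars.split₀.go, hw c (Or.inl rfl), hc, ih (fun d hd => hw d (Or.inr hd))]

theorem pvGo_len_mono (s : List Char) (cur : List Char) (acc : List (List Char)) :
    acc.length ≤ (PySem.Chars.split₀.go s cur acc).length := by
  induction s generalizing cur acc with
  | nil =>
    by_cases hc : cur.isEmpty <;> simp [PySem.Chars.split₀.go, hc]
  | cons c s' ih =>
    by_cases hs : PySem.Chars.isspace c
    · by_cases hc : cur.isEmpty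
      · simpa [PySem.Chars.split₀.go, hs, hc] using ih [] acc
      · have := ih [] (cur.reverse :: acc)
        simp only [List.length_cons] at this
        simpa [PySem.Chars.split₀.go, hs, hc] using le_trans (Nat.le_succ _) this
    · simpa [PySem.Chars.split₀.go, hs] using ih (c :: cur) acc

theorem pvGo_len_cur (s : List Char) (cur : List Char) (acc : List (List Char)) (h : cur ≠ []) :
    acc.length + 1 ≤ (PySem.Chars.split₀.go s cur acc).length := by
  induction s generalizing cur acc with
  | nil => simp [PySem.Chars.split₀.go, h]
  | cons c s' ih =>
    by_cases hs : PySem.Chars.isspace c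
    · have := pvGo_len_mono s' [] (cur.reverse :: acc)
      simp only [List.length_cons] at this
      simpa [PySem.Chars.split₀.go, hs, h] using this
    · simpa [PySem.Chars.split₀.go, hs] using ih (c :: cur) acc (by simp)

theorem pvGo_spaces_skip (w : List Char) (hw : ∀ c ∈ w, PySem.Chars.isspace c = true)
    (s : List Char) (acc : List (List Char)) :
    PySem.Chars.split₀.go (w ++ s) [] acc = PySem.Chars.split₀.go s [] acc := by
  induction w with
  | nil => simp
  | cons c w' ih =>
    simp only [List.mem_cons] at hw
    simp [PySem.Chars.split₀.go, hw c (Or.inl rfl), ih (fun d hd => hw d (Or.inr hd))]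

theorem pvSplit_single (n w : List Char) (hn : n ≠ [])
    (hns : ∀ c ∈ n, PySem.Chars.isspace c = false) (hw : ∀ c ∈ w, PySem.Chars.isspace c = true) :
    PySem.Chars.split₀ (n ++ w) = [n] := by
  unfold PySem.Chars.split₀
  rw [pvGo_prefix n hns w [] []]
  rw [pvGo_spaces w hw]
  simp [hn]

theorem pvSplit_two (n w : List Char) (c : Char) (z : List Char) (hn : n ≠ [])
    (hns : ∀ x ∈ n, PySem.Chars.isspace x = false) (hwne : w ≠ [])
    (hw : ∀ x ∈ w, PySem.Chars.isspace x = true) (hc : PySem.Chars.isspace c = false) :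
    2 ≤ (PySem.Chars.split₀ (n ++ w ++ c :: z)).length := by
  unfold PySem.Chars.split₀
  rw [List.append_assoc, pvGo_prefix n hns _ [] []]
  obtain ⟨w0, w', rfl⟩ := List.exists_cons_of_ne_nil hwne
  simp only [List.mem_cons] at hw
  rw [List.cons_append]
  have h1 : PySem.Chars.split₀.go (w0 :: (w' ++ c :: z)) (n.reverse ++ []) []
      = PySem.Chars.split₀.go (w' ++ c :: z) [] [n] := by
    simp [PySem.Chars.split₀.go, hw w0 (Or.inl rfl), hn]
  rw [h1, pvGo_spaces_skip w' (fun d hd => hw d (Or.inr hd))]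
  have h2 : PySem.Chars.split₀.go (c :: z) [] [n] = PySem.Chars.split₀.go z [c] [n] := by
    simp [PySem.Chars.split₀.go, hc]
  rw [h2]
  exact pvGo_len_cur z [c] [n] (by simp)

theorem pvDropWhile_head {p : Char → Bool} {l z : List Char} {c : Char}
    (h : l.dropWhile p = c :: z) : p c = false := by
  induction l with
  | nil => simp at h
  | cons a l ih =>
    rw [List.dropWhile_cons] at h
    by_cases hp : p a
    · rw [if_pos hp] at h; exact ih h
    · rw [if_neg hp] at h
      injection h with h1 h2
      subst h1
      simpa using hp

theorem pvMain (text : String) : split_assignment_py text = split_assignment_py_alt text := by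
  unfold split_assignment_py split_assignment_py_alt
  simp only [pvNameLoop_eq]
  generalize hT : text.toList = t
  obtain ⟨n, hndef⟩ : ∃ n, t.takeWhile pvPb = n := ⟨_, rfl⟩
  obtain ⟨r, hrdef⟩ : ∃ r, t.dropWhile pvPb = r := ⟨_, rfl⟩
  have hsplit : n ++ r = t := by rw [← hndef, ← hrdef]; exact List.takeWhile_append_dropWhile
  rw [hndef, hrdef]
  have hnmem : ∀ x ∈ n, pvPb x = true := by
    intro x hx; rw [← hndef] at hx; exact List.mem_takeWhile_imp hx
  cases n with
  | nil =>
    -- name empty: A returns (none, text); show every reachable arm of B does too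
    by_cases hmem : '=' ∈ t
    · obtain ⟨z1, z2, hz, hz1⟩ := pvFirstEq_split t hmem
      have hpe : pvPartitionEq t = some (z1, z2) := by
        rw [hz]; exact pvPartitionEq_append z1 z2 hz1
      rw [hpe]
      cases z1 with
      | nil => simp
      | cons c0 z1' =>
        have hpb : pvPb c0 = false := by
          by_contra hne
          rw [hz] at hndef
          simp [eq_true_of_ne_false hne] at hndef
        have hc0 : c0 ≠ '=' := by intro h; exact hz1 (by simp [h])
        have hsp : PySem.Chars.isspace c0 = true := by
          cases h : PySem.Chars.isspace c0
          · exfalso; apply absurd hpb; simp [pvPb, h, hc0]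
          · rfl
        simp [hsp]
    · rw [pvPartitionEq_of_not_mem t hmem]; simp
  | cons c0 n' =>
    have hnsp : ∀ x ∈ c0 :: n', PySem.Chars.isspace x = false := by
      intro x hx; have := hnmem x hx; simp [pvPb] at this; exact this.1
    have hneq : ∀ x ∈ c0 :: n', x ≠ '=' := by
      intro x hx; have := hnmem x hx; simp [pvPb] at this; exact this.2
    obtain ⟨w, hwdef⟩ : ∃ w, r.takeWhile PySem.Chars.isspace = w := ⟨_, rfl⟩
    obtain ⟨r2, hr2def⟩ : ∃ r2, r.dropWhile PySem.Chars.isspace = r2 := ⟨_, rfl⟩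
    have hrsplit : w ++ r2 = r := by
      rw [← hwdef, ← hr2def]; exact List.takeWhile_append_dropWhile
    have hwsp : ∀ x ∈ w, PySem.Chars.isspace x = true := by
      intro x hx; rw [← hwdef] at hx; exact List.mem_takeWhile_imp hx
    have hlstrip : PySem.Chars.lstrip r = r2 := hr2def
    rw [hlstrip]
    cases r2 with
    | nil =>
      -- no non-space character after the name: there is no '=' in t at all
      have hmem : '=' ∉ t := by
        intro hm
        rw [← hsplit] at hm
        rcases List.mem_append.mp hm with h | h
        · exact hneq '=' h rfl
        · rw [← hrsplit, List.append_nil] at h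
          have := hwsp '=' h
          simp [PySem.Chars.isspace] at this
      rw [pvPartitionEq_of_not_mem t hmem]
      simp [PySem.Chars.startswith]
    | cons c1 z =>
      have hc1sp : PySem.Chars.isspace c1 = false := pvDropWhile_head hr2def
      by_cases hc1 : c1 = '='
      · -- success case: remaining starts with '='
        subst hc1
        have hteq : t = ((c0 :: n') ++ w) ++ '=' :: z := by
          rw [← hsplit, ← hrsplit]; simp
        have hpe : pvPartitionEq t = some ((c0 :: n') ++ w, z) := by
          rw [hteq]
          apply pvPartitionEq_append
          intro hm
          rcases List.mem_append.mp hm with h | h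
          · exact hneq '=' h rfl
          · have := hwsp '=' h; simp [PySem.Chars.isspace] at this
        rw [hpe]
        have htok : PySem.Chars.split₀ ((c0 :: n') ++ w) = [c0 :: n'] :=
          pvSplit_single _ _ (by simp) hnsp hwsp
        have hc0sp : PySem.Chars.isspace c0 = false := hnsp c0 (by simp)
        simp only [List.cons_append] at htok
        simp [htok, PySem.Chars.startswith, List.isPrefixOf, hc0sp,
          PySem.Chars.slice_eq_listSlice, PySem.List.slice_from_one]
      · -- failure case: remaining starts with a non-'=' non-space character
        have hwne : w ≠ [] := by
          intro hwnil
          have hrr : r = c1 :: z := by rw [← hrsplit, hwnil]; simp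
          rw [hrr] at hrdef
          have h := pvDropWhile_head hrdef
          simp [pvPb, hc1sp, hc1] at h
        by_cases hmem : '=' ∈ t
        · have hmz : '=' ∈ z := by
            rw [← hsplit, ← hrsplit] at hmem
            rcases List.mem_append.mp hmem with h | h
            · exact absurd rfl (hneq '=' h)
            · rcases List.mem_append.mp h with h | h
              · have := hwsp '=' h; simp [PySem.Chars.isspace] at this
              · rcases List.mem_cons.mp h with h | h
                · exact absurd h.symm hc1
                · exact h
          obtain ⟨z1, z2, hzz, hz1⟩ := pvFirstEq_split z hmz
          have hteq : t = ((c0 :: n') ++ w ++ c1 :: z1) ++ '=' :: z2 := by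
            rw [← hsplit, ← hrsplit, hzz]; simp
          have hpe : pvPartitionEq t = some ((c0 :: n') ++ w ++ c1 :: z1, z2) := by
            rw [hteq]
            apply pvPartitionEq_append
            intro hm
            rcases List.mem_append.mp hm with h | h
            · rcases List.mem_append.mp h with h | h
              · exact hneq '=' h rfl
              · have := hwsp '=' h; simp [PySem.Chars.isspace] at this
            · rcases List.mem_cons.mp h with h | h
              · exact hc1 h.symm
              · exact hz1 h
          rw [hpe]
          have hlen : 2 ≤ (PySem.Chars.split₀ ((c0 :: n') ++ w ++ c1 :: z1)).length :=
            pvSplit_two _ _ _ _ (by simp) hnsp hwne hwsp hc1sp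
          have hc0sp : PySem.Chars.isspace c0 = false := hnsp c0 (by simp)
          simp only [List.cons_append, List.append_assoc] at hlen
          have hne1 : (PySem.Chars.split₀ (c0 :: (n' ++ (w ++ c1 :: z1)))).length ≠ 1 := by omega
          simp [PySem.Chars.startswith, List.isPrefixOf, hc0sp, Ne.symm hc1, hne1]
        · rw [pvPartitionEq_of_not_mem t hmem]
          simp [PySem.Chars.startswith, List.isPrefixOf, Ne.symm hc1]

-- ===== VERDICT (by name: the statement is the Claim_ definition above) =====
theorem split_assignment_py_spec : Claim_equal_split_assignment_py := by
  intro text _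
  unfold Spec_split_assignment_py
  exact pvMain text
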